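-- pv_equiv track=rewrite | github.com/erick129n/Arquitectura-De-Computadoras-25B | DecodificadorPython/decodificador.py | obtener_codigo_binario
-- ===== SOURCE A (Python) =====
-- instruccion_logica_aritmetica = {
--     '100000': 'ADD',   # Add
--     '100010': 'SUB',   # Subtract
--     '100100': 'AND',   # And
--     '100111': 'NOR',   # Nor
--     '100101': 'OR',    # Or
--     '101010': 'SLT',   # Set Less Than
--     '000000': 'NOP'    # No Operation
-- }
--
-- instruccion_logica_aritmetica_inmediata = {
--     '001000': 'ADDI',  # Add Immediate
--     '001001': 'ADDIU', # Add Immediate Unsigned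
--     '001100': 'ANDI',  # And Immediate
--     '001101': 'ORI',   # Or Immediate
--     '001110': 'XORI',  # Xor Immediate
--     '001010': 'SLTI',  # Set Less Than Immediate
--     '001011': 'SLTIU'  # Set Less Than Immediate Unsigned
-- }
--
-- instrucciones_memoria = {
--     '100011': 'LW',    # Load Word
--     '101011': 'SW',    # Store Word
--     '100000': 'LB',    # Load Byte
--     '101000': 'SB'     # Store Byte
-- }
--
-- instrucciones_condicionales = {
--     '000100': 'BEQ',   # Branch if Equal
--     '000101': 'BNE'    # Branch if Not Equal
-- }
--
-- instrucciones_salto = {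
--     '000010': 'J',     # Jump
--     '000011': 'JAL'    # Jump and Link
-- }
--
-- def obtener_codigo_binario(instruccion):
--     """Devuelve el c贸digo binario asociado a la instrucci贸n."""
--     for clave, valor in instruccion_logica_aritmetica.items():
--         if valor == instruccion:
--             return ('R', clave)
--     for clave, valor in instruccion_logica_aritmetica_inmediata.items():
--         if valor == instruccion:
--             return ('I', clave)
--     for clave, valor in instrucciones_memoria.items():
--         if valor == instruccion:
--             return ('M', clave)
--     for clave, valor in instrucciones_condicionales.items():
--         if valor == instruccion:
--             return ('C', clave)
--     for clave, valor in instrucciones_salto.items():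
--         if valor == instruccion:
--             return ('J', clave)
--     return (None, None)
-- ===== SOURCE B (Python) =====
-- instruccion_logica_aritmetica = {
--     '100000': 'ADD', '100010': 'SUB', '100100': 'AND', '100111': 'NOR',
--     '100101': 'OR', '101010': 'SLT', '000000': 'NOP'
-- }
-- instruccion_logica_aritmetica_inmediata = {
--     '001000': 'ADDI', '001001': 'ADDIU', '001100': 'ANDI', '001101': 'ORI',
--     '001110': 'XORI', '001010': 'SLTI', '001011': 'SLTIU'
-- }
-- instrucciones_memoria = {
--     '100011': 'LW', '101011': 'SW', '100000': 'LB', '101000': 'SB'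
-- }
-- instrucciones_condicionales = {
--     '000100': 'BEQ', '000101': 'BNE'
-- }
-- instrucciones_salto = {
--     '000010': 'J', '000011': 'JAL'
-- }
--
-- # One reverse map built once: mnemonic -> (type letter, binary code).
-- # Mnemonics are unique across the five tables, so a single lookup
-- # reproduces the original first-match behaviour exactly.
-- _REVERSE = {
--     valor: (tipo, clave)
--     for tabla, tipo in [
--         (instruccion_logica_aritmetica, 'R'),
--         (instruccion_logica_aritmetica_inmediata, 'I'),
--         (instrucciones_memoria, 'M'),
--         (instrucciones_condicionales, 'C'),
--         (instrucciones_salto, 'J'),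
--     ]
--     for clave, valor in tabla.items()
-- }
--
-- def obtener_codigo_binario(instruccion):
--     """Devuelve el código binario asociado a la instrucción."""
--     return _REVERSE.get(instruccion, (None, None))
-- ===== Notes on version B (the rewrite author's own statement) =====
-- stated objective: simpler
-- what changed: Replaces five sequential scans over the five opcode dicts by one reverse dictionary (mnemonic -> (type, code)) built once, so the function body is a single dict lookup with default.
import Mathlib
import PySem

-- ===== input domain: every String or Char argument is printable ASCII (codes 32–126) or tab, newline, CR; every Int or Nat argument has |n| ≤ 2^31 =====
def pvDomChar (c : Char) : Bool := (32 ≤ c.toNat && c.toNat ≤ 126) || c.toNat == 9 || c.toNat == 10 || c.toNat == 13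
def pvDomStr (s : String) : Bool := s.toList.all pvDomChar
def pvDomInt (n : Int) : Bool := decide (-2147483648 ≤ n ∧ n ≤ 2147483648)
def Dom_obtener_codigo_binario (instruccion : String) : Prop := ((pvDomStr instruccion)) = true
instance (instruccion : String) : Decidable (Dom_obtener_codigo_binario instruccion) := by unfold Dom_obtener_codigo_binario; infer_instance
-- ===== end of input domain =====

-- B replaces A's five sequential table scans by one reverse dictionary built once; objective: simpler.

-- ===== PORT A =====
-- the five module-level dicts, as association lists in insertion order (shared data, used by both ports)
def tablaR : List (String × String) :=
  [("100000","ADD"),("100010","SUB"),("100100","AND"),("100111","NOR"),("100101","OR"),("101010","SLT"),("000000","NOP")]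
def tablaI : List (String × String) :=
  [("001000","ADDI"),("001001","ADDIU"),("001100","ANDI"),("001101","ORI"),("001110","XORI"),("001010","SLTI"),("001011","SLTIU")]
def tablaM : List (String × String) :=
  [("100011","LW"),("101011","SW"),("100000","LB"),("101000","SB")]
def tablaC : List (String × String) :=
  [("000100","BEQ"),("000101","BNE")]
def tablaJ : List (String × String) :=
  [("000010","J"),("000011","JAL")]

-- one 'for clave, valor in tabla.items(): if valor == instruccion: return (tipo, clave)' loop
def buscarA (tipo : String) (ins : String) : List (String × String) → Option (Option String × Option String)
  | [] => none
  | (clave, valor) :: rest => if valor == ins then some (some tipo, some clave) else buscarA tipo ins rest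

def obtener_codigo_binario (instruccion : String) : Option String × Option String :=
  match buscarA "R" instruccion tablaR with
  | some r => r
  | none =>
  match buscarA "I" instruccion tablaI with
  | some r => r
  | none =>
  match buscarA "M" instruccion tablaM with
  | some r => r
  | none =>
  match buscarA "C" instruccion tablaC with
  | some r => r
  | none =>
  match buscarA "J" instruccion tablaJ with
  | some r => r
  | none => (none, none)

-- ===== PORT B =====
-- the reverse-map comprehension: mnemonic -> (type letter, binary code), from the five tagged tables
def revDict : PySem.Dict String (String × String) :=
  PySem.Dict.ofList
    (([(tablaR, "R"), (tablaI, "I"), (tablaM, "M"), (tablaC, "C"), (tablaJ, "J")]).flatMap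
      (fun p => p.1.map (fun cv => (cv.2, (p.2, cv.1)))))

def obtener_codigo_binario_alt (instruccion : String) : Option String × Option String :=
  match revDict.get? instruccion with
  | some tc => (some tc.1, some tc.2)
  | none => (none, none)

-- ===== PRECONDITION & SPEC =====
def Spec_obtener_codigo_binario (instruccion : String) (out : Option String × Option String) : Prop := out = obtener_codigo_binario_alt instruccion
instance (instruccion : String) (out : Option String × Option String) : Decidable (Spec_obtener_codigo_binario instruccion out) := by unfold Spec_obtener_codigo_binario; infer_instance

-- ===== CLAIM (what is proved, stated in full; the proofs are below) =====
def Claim_equal_obtener_codigo_binario : Prop := ∀ (instruccion : String), Dom_obtener_codigo_binario instruccion → Spec_obtener_codigo_binario instruccion (obtener_codigo_binario instruccion)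

-- ===== LEMMAS AND PROOFS =====

-- the built reverse dict, evaluated to its literal
theorem revDict_eq : revDict = PySem.Dict.mk
    [("ADD",("R","100000")),("SUB",("R","100010")),("AND",("R","100100")),("NOR",("R","100111")),
     ("OR",("R","100101")),("SLT",("R","101010")),("NOP",("R","000000")),
     ("ADDI",("I","001000")),("ADDIU",("I","001001")),("ANDI",("I","001100")),("ORI",("I","001101")),
     ("XORI",("I","001110")),("SLTI",("I","001010")),("SLTIU",("I","001011")),
     ("LW",("M","100011")),("SW",("M","101011")),("LB",("M","100000")),("SB",("M","101000")),
     ("BEQ",("C","000100")),("BNE",("C","000101")),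
     ("J",("J","000010")),("JAL",("J","000011"))] := by decide

-- ===== VERDICT (by name: the statement is the Claim_ definition above) =====
theorem obtener_codigo_binario_spec : Claim_equal_obtener_codigo_binario := by
  intro i _
  unfold Spec_obtener_codigo_binario
  by_cases h0 : i = "ADD"
  · subst h0; decide
  by_cases h1 : i = "SUB"
  · subst h1; decide
  by_cases h2 : i = "AND"
  · subst h2; decide
  by_cases h3 : i = "NOR"
  · subst h3; decide
  by_cases h4 : i = "OR"
  · subst h4; decide
  by_cases h5 : i = "SLT"
  · subst h5; decide
  by_cases h6 : i = "NOP"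
  · subst h6; decide
  by_cases h7 : i = "ADDI"
  · subst h7; decide
  by_cases h8 : i = "ADDIU"
  · subst h8; decide
  by_cases h9 : i = "ANDI"
  · subst h9; decide
  by_cases h10 : i = "ORI"
  · subst h10; decide
  by_cases h11 : i = "XORI"
  · subst h11; decide
  by_cases h12 : i = "SLTI"
  · subst h12; decide
  by_cases h13 : i = "SLTIU"
  · subst h13; decide
  by_cases h14 : i = "LW"
  · subst h14; decide
  by_cases h15 : i = "SW"
  · subst h15; decide
  by_cases h16 : i = "LB"
  · subst h16; decide
  by_cases h17 : i = "SB"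
  · subst h17; decide
  by_cases h18 : i = "BEQ"
  · subst h18; decide
  by_cases h19 : i = "BNE"
  · subst h19; decide
  by_cases h20 : i = "J"
  · subst h20; decide
  by_cases h21 : i = "JAL"
  · subst h21; decide
  simp [obtener_codigo_binario, obtener_codigo_binario_alt, revDict_eq, buscarA,
    tablaR, tablaI, tablaM, tablaC, tablaJ, PySem.Dict.get?,
    Ne.symm h0, Ne.symm h1, Ne.symm h2, Ne.symm h3, Ne.symm h4, Ne.symm h5, Ne.symm h6, Ne.symm h7, Ne.symm h8, Ne.symm h9, Ne.symm h10, Ne.symm h11, Ne.symm h12, Ne.symm h13, Ne.symm h14, Ne.symm h15, Ne.symm h16, Ne.symm h17, Ne.symm h18, Ne.symm h19, Ne.symm h20, Ne.symm h21]
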